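-- pv_equiv track=rewrite | github.com/Kelvin123459/biolpp | biolpp_algorithms.py | rna_inferring
-- ===== SOURCE A (Python) =====
-- def rna_inferring(seq):
--     seq = seq.upper()
--     freqs = {}
--     RNA_CDT = __rna_codon_table()
--     for k, v in RNA_CDT.items():
--         if v not in freqs:
--             freqs[v] = 0
--         freqs[v] += 1
--     result = freqs
--     stop = result['STOP']
--     for c in seq:
--         stop *= result[c]
--     return stop
--
-- def __rna_codon_table():
--     table = {
--         "UUU" : "F", "CUU" : "L", "AUU" : "I", "GUU" : "V",
--         "UUC" : "F", "CUC" : "L", "AUC" : "I", "GUC" : "V",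
--         "UUA" : "L", "CUA" : "L", "AUA" : "I", "GUA" : "V",
--         "UUG" : "L", "CUG" : "L", "AUG" : "M", "GUG" : "V",
--         "UCU" : "S", "CCU" : "P", "ACU" : "T", "GCU" : "A",
--         "UCC" : "S", "CCC" : "P", "ACC" : "T", "GCC" : "A",
--         "UCA" : "S", "CCA" : "P", "ACA" : "T", "GCA" : "A",
--         "UCG" : "S", "CCG" : "P", "ACG" : "T", "GCG" : "A",
--         "UAU" : "Y", "CAU" : "H", "AAU" : "N", "GAU" : "D",
--         "UAC" : "Y", "CAC" : "H", "AAC" : "N", "GAC" : "D",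
--         "UAA" : "STOP", "CAA" : "Q", "AAA" : "K", "GAA" : "E",
--         "UAG" : "STOP", "CAG" : "Q", "AAG" : "K", "GAG" : "E",
--         "UGU" : "C", "CGU" : "R", "AGU" : "S", "GGU" : "G",
--         "UGC" : "C", "CGC" : "R", "AGC" : "S", "GGC" : "G",
--         "UGA" : "STOP", "CGA" : "R", "AGA" : "R", "GGA" : "G",
--         "UGG" : "W", "CGG" : "R", "AGG" : "R", "GGG" : "G"
--     }
--     return table
-- ===== SOURCE B (Python) =====
-- # Degeneracy of the standard RNA codon table: how many codons encode each amino acid.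
-- _DEGENERACY = {
--     'A': 4, 'C': 2, 'D': 2, 'E': 2, 'F': 2, 'G': 4, 'H': 2,
--     'I': 3, 'K': 2, 'L': 6, 'M': 1, 'N': 2, 'P': 4, 'Q': 2,
--     'R': 6, 'S': 6, 'T': 4, 'V': 4, 'W': 1, 'Y': 2, 'STOP': 3,
-- }
--
-- def rna_inferring(seq):
--     seq = seq.upper()
--     counts = {}
--     for c in seq:
--         counts[c] = counts.get(c, 0) + 1
--     result = _DEGENERACY['STOP']
--     for c, n in counts.items():
--         result *= _DEGENERACY[c] ** n
--     return result
-- ===== Notes on version B (the rewrite author's own statement) =====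
-- stated objective: alternative
-- what changed: B drops the 64-entry codon table and its value-counting loop in favour of the known degeneracy constants of the genetic code, counts the protein characters once, and combines them with one exponentiation per distinct residue instead of A's per-character running multiply.
import Mathlib
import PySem

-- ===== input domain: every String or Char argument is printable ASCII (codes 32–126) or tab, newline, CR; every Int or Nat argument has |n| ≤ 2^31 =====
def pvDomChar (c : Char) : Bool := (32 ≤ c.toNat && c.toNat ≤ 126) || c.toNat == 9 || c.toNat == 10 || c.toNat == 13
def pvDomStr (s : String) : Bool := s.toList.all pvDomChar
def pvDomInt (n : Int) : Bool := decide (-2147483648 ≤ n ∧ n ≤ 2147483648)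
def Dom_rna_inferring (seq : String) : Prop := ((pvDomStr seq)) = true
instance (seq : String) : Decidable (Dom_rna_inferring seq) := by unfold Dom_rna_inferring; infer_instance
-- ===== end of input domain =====

-- B replaces the 64-entry codon table and A's value-counting loop by the degeneracy
-- constants of the genetic code, counts the protein characters once, and uses one
-- exponentiation per distinct residue instead of a per-character running multiply
-- (objective: alternative).

-- ===== PORT A =====
-- __rna_codon_table(): the literal dict
def rnaCodonTable : PySem.Dict String String := PySem.Dict.ofList [
  ("UUU", "F"), ("CUU", "L"), ("AUU", "I"), ("GUU", "V"),
  ("UUC", "F"), ("CUC", "L"), ("AUC", "I"), ("GUC", "V"),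
  ("UUA", "L"), ("CUA", "L"), ("AUA", "I"), ("GUA", "V"),
  ("UUG", "L"), ("CUG", "L"), ("AUG", "M"), ("GUG", "V"),
  ("UCU", "S"), ("CCU", "P"), ("ACU", "T"), ("GCU", "A"),
  ("UCC", "S"), ("CCC", "P"), ("ACC", "T"), ("GCC", "A"),
  ("UCA", "S"), ("CCA", "P"), ("ACA", "T"), ("GCA", "A"),
  ("UCG", "S"), ("CCG", "P"), ("ACG", "T"), ("GCG", "A"),
  ("UAU", "Y"), ("CAU", "H"), ("AAU", "N"), ("GAU", "D"),
  ("UAC", "Y"), ("CAC", "H"), ("AAC", "N"), ("GAC", "D"),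
  ("UAA", "STOP"), ("CAA", "Q"), ("AAA", "K"), ("GAA", "E"),
  ("UAG", "STOP"), ("CAG", "Q"), ("AAG", "K"), ("GAG", "E"),
  ("UGU", "C"), ("CGU", "R"), ("AGU", "S"), ("GGU", "G"),
  ("UGC", "C"), ("CGC", "R"), ("AGC", "S"), ("GGC", "G"),
  ("UGA", "STOP"), ("CGA", "R"), ("AGA", "R"), ("GGA", "G"),
  ("UGG", "W"), ("CGG", "R"), ("AGG", "R"), ("GGG", "G")]

-- A: freqs built over RNA_CDT.items() ('if v not in freqs: freqs[v]=0; freqs[v]+=1'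
-- is Dict.modify v 0 (+1)); result[c] / result['STOP'] are lookups that raise on a
-- missing key — excluded by Pre_, ported as getD _ 0.
def rna_inferring (seq : String) : Int :=
  let sequ := PySem.Str.upper seq
  let freqs := rnaCodonTable.items.foldl
      (fun d kv => d.modify kv.2 0 (· + 1)) PySem.Dict.empty
  let stop := freqs.getD "STOP" 0
  sequ.toList.foldl (fun acc c => acc * freqs.getD (String.ofList [c]) 0) stop

-- ===== PORT B =====
-- Source B's module constant _DEGENERACY, a literal
def degeneracy : PySem.Dict String Int := PySem.Dict.ofList [
  ("A", 4), ("C", 2), ("D", 2), ("E", 2), ("F", 2), ("G", 4), ("H", 2),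
  ("I", 3), ("K", 2), ("L", 6), ("M", 1), ("N", 2), ("P", 4), ("Q", 2),
  ("R", 6), ("S", 6), ("T", 4), ("V", 4), ("W", 1), ("Y", 2), ("STOP", 3)]

def rna_inferring_alt (seq : String) : Int :=
  let sequ := PySem.Str.upper seq
  let counts := sequ.toList.foldl
      (fun d c => d.insert c (d.getD c 0 + 1)) (PySem.Dict.empty : PySem.Dict Char Int)
  let result := degeneracy.getD "STOP" 0
  counts.items.foldl
      (fun acc p => acc * (degeneracy.getD (String.ofList [p.1]) 0) ^ p.2.toNat) result

-- ===== PRECONDITION & SPEC =====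
-- Pre_ excludes exactly the inputs on which the Python raises KeyError (both A and B do):
-- a character of seq.upper() that is not one of the 20 amino-acid letters.
def Pre_rna_inferring (seq : String) : Prop :=
  ((PySem.Chars.upper seq.toList).all
    (fun c => (['A','C','D','E','F','G','H','I','K','L','M','N','P','Q','R','S','T','V','W','Y'] : List Char).contains c)) = true
instance (seq : String) : Decidable (Pre_rna_inferring seq) := by
  unfold Pre_rna_inferring; infer_instance

def pvWitness_rna_inferring : String := "MkFly"

def Spec_rna_inferring (seq : String) (out : Int) : Prop := out = rna_inferring_alt seq
instance (seq : String) (out : Int) : Decidable (Spec_rna_inferring seq out) := by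
  unfold Spec_rna_inferring; infer_instance

-- ===== CLAIM (what is proved, stated in full; the proofs are below) =====
def Claim_equal_rna_inferring : Prop :=
  ∀ (seq : String), Dom_rna_inferring seq → Pre_rna_inferring seq →
    Spec_rna_inferring seq (rna_inferring seq)

-- ===== LEMMAS AND PROOFS =====

-- a running multiply is the product of the mapped list
theorem foldl_mul_eq_prod {β : Type} (l : List β) (f : β → Int) (a : Int) :
    l.foldl (fun acc c => acc * f c) a = a * (l.map f).prod := by
  induction l generalizing a with
  | nil => simp
  | cons x xs ih => simp [List.foldl_cons, ih, mul_assoc]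

-- grouping: the product over l equals the product of f k ^ (count of k) over any
-- nodup list s covering l's elements
theorem prod_map_eq_prod_pow_count (l : List Char) (f : Char → Int) :
    ∀ (s : List Char), s.Nodup → (∀ c ∈ l, c ∈ s) →
      (l.map f).prod = (s.map (fun k => f k ^ l.count k)).prod := by
  intro s
  induction s generalizing l with
  | nil =>
    intro _ hcov
    have : l = [] := List.eq_nil_iff_forall_not_mem.mpr (fun c hc => by simpa using hcov c hc)
    subst this; simp
  | cons k s' ih =>
    intro hnd hcov
    have hnd' : s'.Nodup := (List.nodup_cons.mp hnd).2
    have hk : k ∉ s' := (List.nodup_cons.mp hnd).1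
    have hperm : l.Perm (l.filter (· == k) ++ l.filter (fun x => !(x == k))) :=
      (List.filter_append_perm (· == k) l).symm
    have hprod : (l.map f).prod
        = ((l.filter (· == k)).map f).prod * ((l.filter (fun x => !(x == k))).map f).prod := by
      rw [((hperm.map f).prod_eq : (l.map f).prod = _), List.map_append, List.prod_append]
    have hfil : l.filter (· == k) = List.replicate (l.count k) k := by
      simp [List.count, List.countP_eq_length_filter]
      exact List.eq_replicate_of_mem (fun c hc => by
        have := List.of_mem_filter hc
        exact eq_of_beq this)
    have hrest : ∀ c ∈ l.filter (fun x => !(x == k)), c ∈ s' := by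
      intro c hc
      have hcl := List.mem_of_mem_filter hc
      have hne : ¬ (c == k) := by
        have := List.of_mem_filter hc; simpa using this
      have : c ∈ k :: s' := hcov c hcl
      rcases List.mem_cons.mp this with h | h
      · exact absurd (by simp [h]) hne
      · exact h
    have hcount : ∀ k' ∈ s', (l.filter (fun x => !(x == k))).count k' = l.count k' := by
      intro k' hk'
      have hne : k' ≠ k := fun h => hk (h ▸ hk')
      simp [List.count_filter, hne]
    rw [hprod, hfil, List.map_replicate, List.prod_replicate,
        ih (l.filter (fun x => !(x == k))) hnd' hrest]
    simp only [List.map_cons, List.prod_cons]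
    congr 1
    exact congrArg List.prod (List.map_congr_left (fun a ha => by rw [hcount a ha]))

-- on each of the 20 amino-acid letters, A's computed frequency table agrees with B's
-- literal degeneracy table (a finite check)
set_option maxRecDepth 100000 in
theorem freqs_eq_degeneracy_on_letters :
    ((['A','C','D','E','F','G','H','I','K','L','M','N','P','Q','R','S','T','V','W','Y'] : List Char).all
      (fun c => (PySem.Dict.counter rnaCodonTable.values).getD (String.ofList [c]) 0
                == degeneracy.getD (String.ofList [c]) 0)) = true := by decide

set_option maxRecDepth 100000 in
theorem stop_eq : (PySem.Dict.counter rnaCodonTable.values).getD "STOP" 0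
    = degeneracy.getD "STOP" 0 := by decide

-- ===== VERDICT (by name: the statement is the Claim_ definition above) =====
set_option maxRecDepth 16384 in
set_option maxHeartbeats 1000000 in
theorem rna_inferring_spec : Claim_equal_rna_inferring := by
  intro seq _ hpre
  unfold Spec_rna_inferring rna_inferring rna_inferring_alt
  -- A's modify-loop over the table items builds the Counter of the table's values
  have htab :
      (rnaCodonTable.items.foldl (fun d kv => d.modify kv.2 0 (· + 1))
        (PySem.Dict.empty : PySem.Dict String Int))
      = PySem.Dict.counter rnaCodonTable.values := by
    rw [PySem.Dict.counter_eq_foldl]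
    have hv : rnaCodonTable.values = rnaCodonTable.items.map (·.2) := by
      simp only [PySem.Dict.values]
    rw [hv, List.foldl_map]
  -- turn both loops into products over the character list / the distinct characters
  simp only [PySem.Dict.foldl_insert_getD_add_one_eq_counter, htab,
    PySem.Dict.items_counter, List.foldl_map, foldl_mul_eq_prod, Int.toNat_natCast]
  -- membership of seq's characters in the 20-letter list, from Pre_
  have hmem : ∀ c ∈ (PySem.Str.upper seq).toList,
      c ∈ (['A','C','D','E','F','G','H','I','K','L','M','N','P','Q','R','S','T','V','W','Y'] : List Char) := by
    intro c hc
    have := List.all_eq_true.mp hpre c (by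
      simpa [PySem.Str.upper] using hc)
    simpa using this
  rw [stop_eq]
  refine congrArg (fun z => degeneracy.getD "STOP" 0 * z) ?_
  rw [prod_map_eq_prod_pow_count (PySem.Str.upper seq).toList
      (fun c => (PySem.Dict.counter rnaCodonTable.values).getD (String.ofList [c]) 0)
      (PySem.Set.ofList (PySem.Str.upper seq).toList)
      (PySem.Set.nodup_ofList _) (fun c hc => (PySem.Set.mem_ofList _ _).mpr hc)]
  refine congrArg List.prod (List.map_congr_left fun k hk => ?_)
  have hkmem : k ∈ (PySem.Str.upper seq).toList := (PySem.Set.mem_ofList _ _).mp hk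
  have := List.all_eq_true.mp freqs_eq_degeneracy_on_letters k (hmem k hkmem)
  rw [eq_of_beq this]
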